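-- pv_equiv track=rewrite | github.com/Indigo-Coder-github/Big-Tech-News | data_manager.py | _group_by_source
-- ===== SOURCE A (Python) =====
-- from typing import List, Dict
--
-- def _group_by_source(articles: List[Dict]) -> Dict[str, List[Dict]]:
--     """기사를 소스별로 그룹화"""
--     groups = {}
--     for article in articles:
--         source = article.get('source', 'Unknown')
--         if source not in groups:
--             groups[source] = []
--         groups[source].append(article)
--
--     # 각 소스 내에서 날짜순 정렬 (최신순)
--     for source in groups:
--         groups[source].sort(
--             key=lambda x: x.get('date', '1900-01-01'),
--             reverse=True
--         )
--
--     return groups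
-- ===== SOURCE B (Python) =====
-- def _group_by_source(articles):
--     order = list(dict.fromkeys(a.get('source', 'Unknown') for a in articles))
--     return {
--         s: sorted((a for a in articles if a.get('source', 'Unknown') == s),
--                   key=lambda x: x.get('date', '1900-01-01'), reverse=True)
--         for s in order
--     }
-- ===== Notes on version B (the rewrite author's own statement) =====
-- stated objective: alternative
-- what changed: B replaces A's incremental dict-of-buckets mutation followed by per-key in-place sorts with a one-pass ordered dedup of sources and a per-source filter-then-sort dict comprehension.
import Mathlib
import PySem

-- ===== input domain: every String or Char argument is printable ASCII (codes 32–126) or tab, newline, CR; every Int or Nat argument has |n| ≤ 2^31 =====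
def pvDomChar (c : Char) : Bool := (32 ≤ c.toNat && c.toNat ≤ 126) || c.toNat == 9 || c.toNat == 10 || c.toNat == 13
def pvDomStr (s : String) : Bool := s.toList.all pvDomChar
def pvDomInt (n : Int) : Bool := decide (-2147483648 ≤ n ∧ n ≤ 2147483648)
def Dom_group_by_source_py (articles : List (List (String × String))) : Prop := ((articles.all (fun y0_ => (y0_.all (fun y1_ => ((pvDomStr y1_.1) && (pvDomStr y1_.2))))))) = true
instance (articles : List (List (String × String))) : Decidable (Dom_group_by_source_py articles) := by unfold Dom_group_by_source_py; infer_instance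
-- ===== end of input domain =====

-- B groups by a single ordered dedup of sources plus one filter-and-sort per source,
-- instead of A's incremental dict-of-buckets mutation followed by per-key in-place sorts
-- (objective: alternative decomposition, same cost).

-- shared helpers: article.get('source','Unknown') and article.get('date','1900-01-01')
def pvSrc (a : List (String × String)) : String :=
  (PySem.Dict.mk a).getD "source" "Unknown"
def pvDate (a : List (String × String)) : String :=
  (PySem.Dict.mk a).getD "date" "1900-01-01"

-- ===== PORT A =====
-- step of A's first loop: setdefault-style insert of an empty bucket, then append
def pvStepA (g : PySem.Dict String (List (List (String × String))))
    (a : List (String × String)) : PySem.Dict String (List (List (String × String))) :=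
  let s := pvSrc a
  let g := if g.contains s then g else g.insert s []
  g.insert s (g.getD s [] ++ [a])

-- step of A's second loop: groups[source].sort(key=…, reverse=True) (in-place overwrite)
def pvSortStep (g : PySem.Dict String (List (List (String × String))))
    (s : String) : PySem.Dict String (List (List (String × String))) :=
  g.insert s (PySem.List.sorted (g.getD s []) pvDate true)

def group_by_source_py (articles : List (List (String × String))) : List (String × List (List (String × String))) :=
  let groups := articles.foldl pvStepA PySem.Dict.empty
  let groups := groups.keys.foldl pvSortStep groups
  groups.items

-- ===== PORT B =====
def group_by_source_py_alt (articles : List (List (String × String))) : List (String × List (List (String × String))) :=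
  let order := PySem.List.dedup (articles.map pvSrc)
  order.map (fun s =>
    (s, PySem.List.sorted (articles.filter (fun a => pvSrc a == s)) pvDate true))

-- ===== PRECONDITION & SPEC =====
def Spec_group_by_source_py (articles : List (List (String × String))) (out : List (String × List (List (String × String)))) : Prop := out = group_by_source_py_alt articles
instance (articles : List (List (String × String))) (out : List (String × List (List (String × String)))) : Decidable (Spec_group_by_source_py articles out) := by unfold Spec_group_by_source_py; infer_instance

-- ===== CLAIM (what is proved, stated in full; the proofs are below) =====
def Claim_equal_group_by_source_py : Prop := ∀ (articles : List (List (String × String))), Dom_group_by_source_py articles → Spec_group_by_source_py articles (group_by_source_py articles)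

-- ===== LEMMAS AND PROOFS =====

-- one A-step: buckets grow only at the article's source
theorem pvStepA_getD (g : PySem.Dict String (List (List (String × String))))
    (a : List (String × String)) (c : String) :
    (pvStepA g a).getD c [] = if c = pvSrc a then g.getD c [] ++ [a] else g.getD c [] := by
  unfold pvStepA
  by_cases h : g.contains (pvSrc a) = true
  · simp only [h, if_true, PySem.Dict.getD_insert]
    split_ifs with hc
    · subst hc; rfl
    · rfl
  · simp only [Bool.not_eq_true] at h
    simp only [h, Bool.false_eq_true, if_false, PySem.Dict.insert_insert_self,
      PySem.Dict.getD_insert]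
    split_ifs with hc
    · subst hc
      rw [PySem.Dict.getD_of_not_contains g [] h]
    · rfl

-- A's first loop computes the filter-buckets
theorem pvFoldA_getD (l : List (List (String × String)))
    (g : PySem.Dict String (List (List (String × String)))) (c : String) :
    (l.foldl pvStepA g).getD c [] = g.getD c [] ++ l.filter (fun a => pvSrc a == c) := by
  induction l generalizing g with
  | nil => simp
  | cons a t ih =>
    simp only [List.foldl_cons, List.filter_cons, ih, pvStepA_getD]
    by_cases hc : c = pvSrc a
    · subst hc; simp
    · have : (pvSrc a == c) = false := by simp [Ne.symm hc]
      simp [hc, this]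

theorem pvStepA_keys (g : PySem.Dict String (List (List (String × String))))
    (a : List (String × String)) :
    (pvStepA g a).keys = PySem.Set.add g.keys (pvSrc a) := by
  unfold pvStepA PySem.Set.add
  by_cases h : g.contains (pvSrc a) = true
  · have hm : pvSrc a ∈ g.keys := (PySem.Dict.contains_iff_mem_keys g _).mp h
    have hks : PySem.Set.contains g.keys (pvSrc a) = true := by
      simpa [PySem.Set.contains] using hm
    simp [h, hm, PySem.Dict.keys_insert_of_contains g _ h]
  · simp only [Bool.not_eq_true] at h
    have hm : pvSrc a ∉ g.keys := fun hm =>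
      by simp [(PySem.Dict.contains_iff_mem_keys g _).mpr hm] at h
    have hks : PySem.Set.contains g.keys (pvSrc a) = false := by
      simpa [PySem.Set.contains] using hm
    have hc1 : (g.insert (pvSrc a) []).contains (pvSrc a) = true := by
      simp
    simp [h, hm, PySem.Dict.keys_insert_of_contains _ _ hc1,
      PySem.Dict.keys_insert_of_not_contains g _ h]

theorem pvFoldA_keys (l : List (List (String × String)))
    (g : PySem.Dict String (List (List (String × String)))) :
    (l.foldl pvStepA g).keys = PySem.Set.update g.keys (l.map pvSrc) := by
  induction l generalizing g with
  | nil => simp [PySem.Set.update_nil]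
  | cons a t ih =>
    simp only [List.foldl_cons, List.map_cons, PySem.Set.update_cons, ih, pvStepA_keys]

-- A's second loop: keys unchanged
theorem pvSortFold_keys (ks : List String)
    (g : PySem.Dict String (List (List (String × String))))
    (h : ∀ k ∈ ks, g.contains k = true) :
    (ks.foldl pvSortStep g).keys = g.keys := by
  induction ks generalizing g with
  | nil => rfl
  | cons k t ih =>
    simp only [List.foldl_cons, pvSortStep]
    rw [ih]
    · exact PySem.Dict.keys_insert_of_contains g _ (h k (by simp))
    · intro j hj
      rw [PySem.Dict.contains_insert]
      simp [h j (by simp [hj])]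

-- A's second loop: each processed bucket gets sorted once
theorem pvSortFold_getD (ks : List String)
    (g d : PySem.Dict String (List (List (String × String))))
    (hnd : ks.Nodup)
    (hg : ∀ k ∈ ks, g.getD k [] = d.getD k []) (c : String) :
    (ks.foldl pvSortStep g).getD c [] =
      if c ∈ ks then PySem.List.sorted (d.getD c []) pvDate true else g.getD c [] := by
  induction ks generalizing g with
  | nil => simp
  | cons k t ih =>
    simp only [List.foldl_cons, pvSortStep]
    have hnd' : t.Nodup := hnd.of_cons
    have hknt : k ∉ t := by simp [List.nodup_cons] at hnd; exact hnd.1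
    rw [ih _ hnd' ?_ ]
    · by_cases hct : c ∈ t
      · simp [hct]
      · rw [PySem.Dict.getD_insert]
        by_cases hck : c = k
        · subst hck
          simp [hct, hg c (by simp)]
        · simp [hct, hck, List.mem_cons]
    · intro j hj
      rw [PySem.Dict.getD_insert]
      have : j ≠ k := fun hjk => hknt (hjk ▸ hj)
      simp [this, hg j (by simp [hj])]

-- ===== VERDICT (by name: the statement is the Claim_ definition above) =====
theorem group_by_source_py_spec : Claim_equal_group_by_source_py := by
  intro articles _
  unfold Spec_group_by_source_py group_by_source_py group_by_source_py_alt
  set G := articles.foldl pvStepA PySem.Dict.empty with hG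
  have hkeys : G.keys = PySem.Set.ofList (articles.map pvSrc) := by
    rw [hG, pvFoldA_keys]
    rw [show (PySem.Dict.empty : PySem.Dict String (List (List (String × String)))).keys = [] from rfl]
    rw [PySem.Set.update_eq_append_filter]
    simp [PySem.Set.contains]
  have hnd : G.keys.Nodup := by rw [hkeys]; exact PySem.Set.nodup_ofList _
  have hbucket : ∀ c, G.getD c [] = articles.filter (fun a => pvSrc a == c) := by
    intro c; rw [hG, pvFoldA_getD]; simp [PySem.Dict.getD_empty]
  have hcont : ∀ k ∈ G.keys, G.contains k = true :=
    fun k hk => (PySem.Dict.contains_iff_mem_keys G k).mpr hk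
  set G2 := G.keys.foldl pvSortStep G with hG2
  have hk2 : G2.keys = G.keys := pvSortFold_keys _ _ hcont
  have hnd2 : G2.keys.Nodup := hk2 ▸ hnd
  rw [PySem.Dict.items_eq_map_keys G2 hnd2 [], hk2, hkeys, ← PySem.List.dedup_eq_ofList]
  apply List.map_congr_left
  intro c hc
  have hcK : c ∈ G.keys := by
    rw [hkeys, ← PySem.List.dedup_eq_ofList]; exact hc
  have hgd := pvSortFold_getD G.keys G G hnd (fun _ _ => rfl) c
  rw [if_pos hcK] at hgd
  rw [← hG2] at hgd
  rw [hgd, hbucket c]
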